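-- pv_equiv track=rewrite | github.com/bartekdylewski/adventofcode | src/day7.py | possible_values
-- ===== SOURCE A (Python) =====
-- def possible_values(numbers):
-- 	assert len(numbers) > 0
-- 	if len(numbers) == 1:
-- 		return {numbers[0]}
--
-- 	result = set()
-- 	for possible_value in possible_values(numbers[:-1]):
-- 		result.add(possible_value + numbers[-1])
-- 		result.add(possible_value * numbers[-1])
-- 		result.add(int(f'{possible_value}{numbers[-1]}'))
-- 	return result
-- ===== SOURCE B (Python) =====
-- def possible_values(numbers):
--     assert len(numbers) > 0
--     current = {numbers[0]}
--     for n in numbers[1:]: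
--         nxt = set()
--         for v in current:
--             nxt.add(v + n)
--             nxt.add(v * n)
--             nxt.add(int(f'{v}{n}'))
--         current = nxt
--     return current
-- ===== Notes on version B (the rewrite author's own statement) =====
-- stated objective: alternative
-- what changed: Replaces A's recursion on the list prefix (numbers[:-1] with re-slicing at every level) with a single left-to-right loop carrying an accumulator set.
import Mathlib
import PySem

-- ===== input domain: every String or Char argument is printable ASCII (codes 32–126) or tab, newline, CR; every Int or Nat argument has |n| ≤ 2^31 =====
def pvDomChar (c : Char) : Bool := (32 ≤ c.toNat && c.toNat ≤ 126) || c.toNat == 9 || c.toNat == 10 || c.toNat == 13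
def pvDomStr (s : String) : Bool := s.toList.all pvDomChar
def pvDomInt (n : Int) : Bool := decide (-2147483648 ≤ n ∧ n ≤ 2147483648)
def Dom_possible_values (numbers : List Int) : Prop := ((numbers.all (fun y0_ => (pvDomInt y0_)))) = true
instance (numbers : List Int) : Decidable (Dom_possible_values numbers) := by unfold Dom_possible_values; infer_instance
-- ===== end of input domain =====

-- B replaces A's recursion on the list prefix with an iterative left-to-right fold over the tail (same operations, same accumulated set).


-- ===== PORT A =====
-- body of A's for-loop: add v+last, v*last, int(f'{v}{last}') to the result set.
-- int(f'{v}{last}') is exact via PySem.Int.ofStr?; it is none (ValueError) iff last < 0, excluded by Pre_.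
def pvBodyA (last : Int) (result : List Int) (v : Int) : List Int :=
  let result := PySem.Set.add result (v + last)
  let result := PySem.Set.add result (v * last)
  PySem.Set.add result ((PySem.Int.ofStr? (PySem.Int.toStr v ++ PySem.Int.toStr last)).getD 0)

def possible_values (numbers : List Int) : List Int :=
  match numbers with
  | [] => []          -- assert fails: Python raises AssertionError; excluded by Pre_
  | [x] => PySem.Set.ofList [x]
  | a :: b :: rest =>
      -- recurse on numbers[:-1], iterate adding the three combinations with numbers[-1]
      (possible_values ((a :: b :: rest).dropLast)).foldl
        (pvBodyA ((a :: b :: rest).getLast (by simp))) PySem.Set.empty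
termination_by numbers.length
decreasing_by simp [List.length_dropLast]

-- ===== PORT B =====
-- body of B's inner for-loop over the current set, for the tail element n.
def pvBodyB (n : Int) (nxt : List Int) (v : Int) : List Int :=
  let nxt := PySem.Set.add nxt (v + n)
  let nxt := PySem.Set.add nxt (v * n)
  PySem.Set.add nxt ((PySem.Int.ofStr? (PySem.Int.toStr v ++ PySem.Int.toStr n)).getD 0)

def possible_values_alt (numbers : List Int) : List Int :=
  match numbers with
  | [] => []          -- assert fails: Python raises AssertionError; excluded by Pre_
  | x :: rest =>
      rest.foldl (fun current n => current.foldl (pvBodyB n) PySem.Set.empty)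
        (PySem.Set.ofList [x])

-- ===== PRECONDITION & SPEC =====
-- Pre_ excludes exactly the inputs where A raises: the empty list (AssertionError) and any
-- list with a negative element after the first (int(f'{v}{n}') raises ValueError); B raises identically there.
def Pre_possible_values (numbers : List Int) : Prop :=
  numbers ≠ [] ∧ ∀ n ∈ numbers.tail, 0 ≤ n
instance (numbers : List Int) : Decidable (Pre_possible_values numbers) := by
  unfold Pre_possible_values; infer_instance
def pvWitness_possible_values : List Int := [81, 40, 27]

def Spec_possible_values (numbers : List Int) (out : List Int) : Prop := out = possible_values_alt numbers
instance (numbers : List Int) (out : List Int) : Decidable (Spec_possible_values numbers out) := by unfold Spec_possible_values; infer_instance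

-- ===== CLAIM (what is proved, stated in full; the proofs are below) =====
def Claim_equal_possible_values : Prop := ∀ (numbers : List Int), Dom_possible_values numbers → Pre_possible_values numbers → Spec_possible_values numbers (possible_values numbers)

-- ===== LEMMAS AND PROOFS =====
-- the two loop bodies are the same function
theorem pvBody_eq : pvBodyA = pvBodyB := rfl

-- B on a snoc-extended tail: one more outer-loop step
theorem alt_snoc (x : Int) (rest : List Int) (n : Int) :
    possible_values_alt ((x :: rest) ++ [n])
      = (possible_values_alt (x :: rest)).foldl (pvBodyB n) PySem.Set.empty := by
  simp [possible_values_alt, List.foldl_append]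

-- A on a snoc-extended nonempty list: one recursion layer peeled
theorem a_snoc (a : Int) (t : List Int) (n : Int) :
    possible_values ((a :: t) ++ [n])
      = (possible_values (a :: t)).foldl (pvBodyA n) PySem.Set.empty := by
  cases t with
  | nil => simp [possible_values]
  | cons b t' =>
      show possible_values (a :: b :: (t' ++ [n])) = _
      rw [possible_values]
      simp only [show a :: b :: (t' ++ [n]) = (a :: b :: t') ++ [n] from rfl,
        List.dropLast_concat, List.getLast_concat]

theorem ports_eq (x : Int) (rest : List Int) :
    possible_values (x :: rest) = possible_values_alt (x :: rest) := by
  induction rest using List.reverseRecOn with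
  | nil => simp [possible_values, possible_values_alt]
  | append_singleton t n ih =>
      rw [show x :: (t ++ [n]) = (x :: t) ++ [n] from rfl, a_snoc, alt_snoc, ih, pvBody_eq]

-- ===== VERDICT (by name: the statement is the Claim_ definition above) =====
theorem possible_values_spec : Claim_equal_possible_values := by
  intro numbers _ hpre
  unfold Spec_possible_values
  cases numbers with
  | nil => exact absurd rfl hpre.1
  | cons x rest => exact ports_eq x rest
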